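-- pv_equiv track=rewrite | github.com/jainary4/Quantum-Imaging | Circuits/Target_Present.py | get_basis_index
-- ===== SOURCE A (Python) =====
-- def get_basis_index(mode_counts, d):
--     """Converts a tuple of photon counts (n1, n2...) to a flat index."""
--     idx = 0
--     stride = 1
--     # Standard lexicographical mapping or big-endian
--     # Here we use: n1*d^(M-1) + n2*d^(M-2)...
--     M = len(mode_counts)
--     for i, n in enumerate(mode_counts):
--         power = M - 1 - i
--         idx += n * (d**power)
--     return idx
-- ===== SOURCE B (Python) =====
-- def get_basis_index(mode_counts, d):
--     """Converts a tuple of photon counts (n1, n2...) to a flat index."""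
--     idx = 0
--     for n in mode_counts:
--         idx = idx * d + n
--     return idx
-- ===== Notes on version B (the rewrite author's own statement) =====
-- stated objective: faster
-- what changed: Replaces the per-element power computation n*d**(M-1-i) with a single Horner pass idx = idx*d + n, eliminating all exponentiations.
import Mathlib
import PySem

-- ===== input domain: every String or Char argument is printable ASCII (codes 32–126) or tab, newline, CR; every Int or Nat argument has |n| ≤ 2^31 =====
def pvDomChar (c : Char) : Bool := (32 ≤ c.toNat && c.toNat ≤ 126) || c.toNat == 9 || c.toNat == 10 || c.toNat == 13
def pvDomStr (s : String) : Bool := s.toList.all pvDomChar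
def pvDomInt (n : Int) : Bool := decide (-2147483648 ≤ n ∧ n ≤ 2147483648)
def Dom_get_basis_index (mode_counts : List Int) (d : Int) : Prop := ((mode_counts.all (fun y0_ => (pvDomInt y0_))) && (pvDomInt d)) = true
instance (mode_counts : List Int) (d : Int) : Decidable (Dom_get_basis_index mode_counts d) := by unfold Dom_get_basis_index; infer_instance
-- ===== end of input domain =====

-- B replaces A's per-element exponentiation n*d^(M-1-i) with a single Horner pass idx = idx*d + n (faster: no powers).


-- ===== PORT A =====
-- literal port of A: enumerate the list and add n * d^(M-1-i) for each entry
def get_basis_index (mode_counts : List Int) (d : Int) : Int :=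
  let M : Int := mode_counts.length
  (PySem.List.enumerate mode_counts 0).foldl
    (fun idx p => idx + p.2 * d ^ (M - 1 - p.1).toNat) 0

-- ===== PORT B =====
-- literal port of B: Horner's method, one multiply-add per element
def get_basis_index_alt (mode_counts : List Int) (d : Int) : Int :=
  mode_counts.foldl (fun idx n => idx * d + n) 0

-- ===== PRECONDITION & SPEC =====
def Spec_get_basis_index (mode_counts : List Int) (d : Int) (out : Int) : Prop := out = get_basis_index_alt mode_counts d
instance (mode_counts : List Int) (d : Int) (out : Int) : Decidable (Spec_get_basis_index mode_counts d out) := by unfold Spec_get_basis_index; infer_instance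

-- ===== CLAIM (what is proved, stated in full; the proofs are below) =====
def Claim_equal_get_basis_index : Prop := ∀ (mode_counts : List Int) (d : Int), Dom_get_basis_index mode_counts d → Spec_get_basis_index mode_counts d (get_basis_index mode_counts d)

-- ===== LEMMAS AND PROOFS =====

-- common reference value: Σ nᵢ · d^(exponent) in structural form
def pvPoly (xs : List Int) (d : Int) : Int :=
  match xs with
  | [] => 0
  | n :: t => n * d ^ t.length + pvPoly t d

theorem pvA_eq_poly (d : Int) : ∀ (xs : List Int) (s idx : Int),
    (PySem.List.enumerate xs s).foldl
      (fun idx p => idx + p.2 * d ^ (s + xs.length - 1 - p.1).toNat) idx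
    = idx + pvPoly xs d := by
  intro xs
  induction xs with
  | nil => intro s idx; simp [PySem.List.enumerate_nil, pvPoly]
  | cons n t ih =>
      intro s idx
      rw [PySem.List.enumerate_cons]
      simp only [List.foldl_cons, List.length_cons]
      push_cast
      have he : ∀ p : Int × Int,
          (fun (idx : Int) (p : Int × Int) => idx + p.2 * d ^ (s + (↑t.length + 1) - 1 - p.1).toNat) =
          (fun (idx : Int) (p : Int × Int) => idx + p.2 * d ^ ((s + 1) + ↑t.length - 1 - p.1).toNat) := by
        intro _; funext i p; congr 2; ring_nf
      rw [he ⟨0, 0⟩, ih (s + 1)]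
      have hexp : (s + (↑t.length + 1) - 1 - s : Int).toNat = t.length := by omega
      rw [hexp, pvPoly]; ring

theorem pvHorner (d : Int) : ∀ (xs : List Int) (acc : Int),
    xs.foldl (fun idx n => idx * d + n) acc = acc * d ^ xs.length + pvPoly xs d := by
  intro xs
  induction xs with
  | nil => intro acc; simp [pvPoly]
  | cons n t ih =>
      intro acc
      rw [List.foldl_cons, ih, pvPoly, List.length_cons, pow_succ]
      ring

-- ===== VERDICT (by name: the statement is the Claim_ definition above) =====
theorem get_basis_index_spec : Claim_equal_get_basis_index := by
  intro mode_counts d _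
  unfold Spec_get_basis_index get_basis_index get_basis_index_alt
  have hA := pvA_eq_poly d mode_counts 0 0
  have hB := pvHorner d mode_counts 0
  simp only [zero_add] at hA
  simp only [zero_mul, zero_add] at hB
  rw [hB, ← hA]
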